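-- pv_equiv track=rewrite | github.com/Danielllllee/china-real-estate-analyzer | utils/styles.py | get_district_names
-- ===== SOURCE A (Python) =====
-- def get_district_names(city_config, with_hierarchy_prefix=True):
--     """从城市配置中提取区域名列表，带层级前缀。
--     返回: [(display_name, actual_name), ...]
--     display_name 用于 UI 展示，actual_name 用于数据查询。
--     """
--     districts = city_config.get("districts", [])
--     parent_map = {}  # parent_name -> [child dicts]
--     top_level = []
--     for d in districts:
--         if "parent" in d:
--             parent_map.setdefault(d["parent"], []).append(d)
--         else:
--             top_level.append(d)
--
--     result = []
--     for d in top_level: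
--         result.append((d["name"], d["name"]))
--         if d["name"] in parent_map:
--             for child in parent_map[d["name"]]:
--                 prefix = "  ↳ " if with_hierarchy_prefix else ""
--                 result.append((f"{prefix}{child['name']}", child["name"]))
--     return result
-- ===== SOURCE B (Python) =====
-- def get_district_names(city_config, with_hierarchy_prefix=True):
--     """Same result as A, but without the parent_map index: for each
--     top-level district we rescan the district list for its children."""
--     districts = city_config.get("districts", [])
--     prefix = "  \u21b3 " if with_hierarchy_prefix else ""
--     result = []
--     for d in districts:
--         if "parent" not in d:
--             result.append((d["name"], d["name"]))
--             for c in districts: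
--                 if "parent" in c and c["parent"] == d["name"]:
--                     result.append((prefix + c["name"], c["name"]))
--     return result
-- ===== Notes on version B (the rewrite author's own statement) =====
-- stated objective: simpler
-- what changed: B drops the parent_map index and the two-phase split entirely: a single pass over the districts emits each top-level district and rescans the full list for its children in place.
import Mathlib
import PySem

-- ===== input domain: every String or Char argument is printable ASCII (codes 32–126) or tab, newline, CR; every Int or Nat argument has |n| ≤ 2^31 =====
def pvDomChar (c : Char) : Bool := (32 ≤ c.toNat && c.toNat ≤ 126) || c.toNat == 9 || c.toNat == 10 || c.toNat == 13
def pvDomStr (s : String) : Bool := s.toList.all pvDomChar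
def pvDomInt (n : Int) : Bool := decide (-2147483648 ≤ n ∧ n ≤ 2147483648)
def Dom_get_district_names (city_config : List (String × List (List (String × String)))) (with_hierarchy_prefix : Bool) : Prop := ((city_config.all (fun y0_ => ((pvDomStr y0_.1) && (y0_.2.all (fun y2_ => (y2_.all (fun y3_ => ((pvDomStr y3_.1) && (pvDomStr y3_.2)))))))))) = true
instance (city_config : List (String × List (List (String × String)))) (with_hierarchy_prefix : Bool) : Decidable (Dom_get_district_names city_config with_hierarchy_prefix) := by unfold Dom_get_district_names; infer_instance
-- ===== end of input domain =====

-- B drops the parent_map index and the two-phase split: one pass over the districts,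
-- rescanning the full list for each top-level district's children (simpler, not faster).

-- shared dict-on-assoc-list primitives (lookup = first match, as the type convention fixes)
-- 'k in d' for a district dict
def dHas (d : List (String × String)) (k : String) : Bool := d.any (fun p => p.1 == k)
-- 'd[k]'; the "" default is never reached inside Pre_ (Python raises KeyError there)
def dGetD (d : List (String × String)) (k : String) : String :=
  ((d.find? (fun p => p.1 == k)).map (·.2)).getD ""

-- ===== PORT A =====
def get_district_names (city_config : List (String × List (List (String × String)))) (with_hierarchy_prefix : Bool) : List (String × String) :=
  -- districts = city_config.get("districts", [])
  let districts := ((city_config.find? (fun p => p.1 == "districts")).map (·.2)).getD []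
  -- first loop: parent_map (setdefault(...).append = modify with default []) and top_level
  let st := districts.foldl
    (fun (s : PySem.Dict String (List (List (String × String))) × List (List (String × String))) d =>
      if dHas d "parent" then
        (s.1.modify (dGetD d "parent") [] (fun l => l ++ [d]), s.2)
      else
        (s.1, s.2 ++ [d]))
    (PySem.Dict.empty, [])
  let parent_map := st.1
  let top_level := st.2
  -- second loop over top_level
  top_level.foldl
    (fun result d =>
      let n := dGetD d "name"
      let result := result ++ [(n, n)]
      if parent_map.contains n then
        (parent_map.getD n []).foldl
          (fun result child =>
            let pfx := if with_hierarchy_prefix then "  ↳ " else ""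
            result ++ [(pfx ++ dGetD child "name", dGetD child "name")])
          result
      else result)
    []

-- ===== PORT B =====
def get_district_names_alt (city_config : List (String × List (List (String × String)))) (with_hierarchy_prefix : Bool) : List (String × String) :=
  let districts := ((city_config.find? (fun p => p.1 == "districts")).map (·.2)).getD []
  let pfx := if with_hierarchy_prefix then "  ↳ " else ""
  districts.foldl
    (fun result d =>
      if !dHas d "parent" then
        let n := dGetD d "name"
        -- inner rescan of the whole list for children of d
        districts.foldl
          (fun result c =>
            if dHas c "parent" && (dGetD c "parent" == n) then
              result ++ [(pfx ++ dGetD c "name", dGetD c "name")]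
            else result)
          (result ++ [(n, n)])
      else result)
    []

-- ===== PRECONDITION & SPEC =====
-- Pre_ excludes exactly the inputs on which A raises KeyError: a top-level district without
-- a "name" key, or a child district without "name" whose parent value is some top-level name.
def Pre_get_district_names (city_config : List (String × List (List (String × String)))) (with_hierarchy_prefix : Bool) : Prop :=
  let districts := ((city_config.find? (fun p => p.1 == "districts")).map (·.2)).getD []
  ∀ d ∈ districts,
    (dHas d "parent" = false → dHas d "name" = true) ∧
    ((dHas d "parent" = true ∧ ∃ t ∈ districts, dHas t "parent" = false ∧ dGetD t "name" = dGetD d "parent")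
      → dHas d "name" = true)
instance (city_config : List (String × List (List (String × String)))) (with_hierarchy_prefix : Bool) : Decidable (Pre_get_district_names city_config with_hierarchy_prefix) := by unfold Pre_get_district_names; infer_instance

def pvWitness_get_district_names : (List (String × List (List (String × String)))) × Bool :=
  ([("districts", [[("name", "Alpha")], [("parent", "Alpha"), ("name", "Beta")]])], true)

def Spec_get_district_names (city_config : List (String × List (List (String × String)))) (with_hierarchy_prefix : Bool) (out : List (String × String)) : Prop := out = get_district_names_alt city_config with_hierarchy_prefix
instance (city_config : List (String × List (List (String × String)))) (with_hierarchy_prefix : Bool) (out : List (String × String)) : Decidable (Spec_get_district_names city_config with_hierarchy_prefix out) := by unfold Spec_get_district_names; infer_instance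

-- ===== CLAIM (what is proved, stated in full; the proofs are below) =====
def Claim_equal_get_district_names : Prop := ∀ (city_config : List (String × List (List (String × String)))) (with_hierarchy_prefix : Bool), Dom_get_district_names city_config with_hierarchy_prefix → Pre_get_district_names city_config with_hierarchy_prefix → Spec_get_district_names city_config with_hierarchy_prefix (get_district_names city_config with_hierarchy_prefix)

-- ===== LEMMAS AND PROOFS =====

-- abbreviations for the proof
def stepA (s : PySem.Dict String (List (List (String × String))) × List (List (String × String)))
    (d : List (String × String)) :
    PySem.Dict String (List (List (String × String))) × List (List (String × String)) :=
  if dHas d "parent" then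
    (s.1.modify (dGetD d "parent") [] (fun l => l ++ [d]), s.2)
  else
    (s.1, s.2 ++ [d])

-- phase 1 of A: top_level is the in-order sublist of parent-less districts
theorem foldA_snd (ds : List (List (String × String)))
    (pm : PySem.Dict String (List (List (String × String)))) (tl : List (List (String × String))) :
    (ds.foldl stepA (pm, tl)).2 = tl ++ ds.filter (fun d => !dHas d "parent") := by
  induction ds generalizing pm tl with
  | nil => simp
  | cons d ds ih =>
      simp only [List.foldl_cons, List.filter_cons, stepA]
      by_cases h : dHas d "parent"
      · simp [h, ih]
      · simp [h, ih]

-- phase 1 of A: any lookup in parent_map is the in-order children sublist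
theorem foldA_getD (ds : List (List (String × String)))
    (pm : PySem.Dict String (List (List (String × String)))) (tl : List (List (String × String)))
    (n : String) :
    ((ds.foldl stepA (pm, tl)).1).getD n []
      = pm.getD n [] ++ ds.filter (fun c => dHas c "parent" && (dGetD c "parent" == n)) := by
  induction ds generalizing pm tl with
  | nil => simp
  | cons d ds ih =>
      simp only [List.foldl_cons, List.filter_cons, stepA]
      by_cases h : dHas d "parent"
      · by_cases he : dGetD d "parent" = n
        · simp [h, he, ih]
        · have hne : (dGetD d "parent" == n) = false := by simp [he]
          simp [h, hne, ih, PySem.Dict.getD_modify, Ne.symm he]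
      · simp [h, ih]

-- the guarded child loop of A equals the unguarded one (absent key ⇒ empty children list)
theorem contains_branch (pm : PySem.Dict String (List (List (String × String))))
    (n : String) (res : List (String × String))
    (g' : List (String × String) → List (String × String) → List (String × String)) :
    (if pm.contains n then (pm.getD n []).foldl g' res else res) = (pm.getD n []).foldl g' res := by
  by_cases h : pm.contains n
  · simp [h]
  · rw [PySem.Dict.getD_of_not_contains pm [] (by simp [h])]
    simp [h]

-- a fold that appends a block for the elements passing a test is flatMap over the filter
theorem foldl_append_block {α β : Type} (xs : List α) (p : α → Bool) (blk : α → List β)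
    (init : List β) :
    xs.foldl (fun acc x => if p x then acc ++ blk x else acc) init
      = init ++ (xs.filter p).flatMap blk := by
  induction xs generalizing init with
  | nil => simp
  | cons x xs ih =>
      simp only [List.foldl_cons, List.filter_cons]
      by_cases h : p x
      · simp [h, ih]
      · simp [h, ih]

theorem get_district_names_spec_aux (city_config : List (String × List (List (String × String))))
    (with_hierarchy_prefix : Bool) :
    get_district_names city_config with_hierarchy_prefix
      = get_district_names_alt city_config with_hierarchy_prefix := by
  unfold get_district_names get_district_names_alt
  set ds := ((city_config.find? (fun p => p.1 == "districts")).map (·.2)).getD [] with hds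
  set pfx := if with_hierarchy_prefix then "  ↳ " else "" with hpfx
  -- rewrite A's state fold via stepA
  have hstep : (fun (s : PySem.Dict String (List (List (String × String))) × List (List (String × String))) d =>
      if dHas d "parent" then
        (s.1.modify (dGetD d "parent") [] (fun l => l ++ [d]), s.2)
      else (s.1, s.2 ++ [d])) = stepA := by
    funext s d; rfl
  simp only [hstep]
  -- A's second loop: remove the contains guard, then both sides are flatMaps
  have hA : ∀ (tl : List (List (String × String))) (res : List (String × String)),
      tl.foldl (fun result d =>
        let n := dGetD d "name"
        let result := result ++ [(n, n)]
        if (ds.foldl stepA (PySem.Dict.empty, [])).1.contains n then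
          ((ds.foldl stepA (PySem.Dict.empty, [])).1.getD n []).foldl
            (fun result child =>
              let px := if with_hierarchy_prefix then "  ↳ " else ""
              result ++ [(px ++ dGetD child "name", dGetD child "name")]) result
        else result) res
      = res ++ tl.flatMap (fun d =>
          (dGetD d "name", dGetD d "name") ::
            (ds.filter (fun c => dHas c "parent" && (dGetD c "parent" == dGetD d "name"))).map
              (fun c => (pfx ++ dGetD c "name", dGetD c "name"))) := by
    intro tl
    induction tl with
    | nil => intro res; simp
    | cons d tl ih =>
        intro res
        simp only [List.foldl_cons, List.flatMap_cons]
        rw [contains_branch, foldA_getD,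
          PySem.Dict.getD_empty, List.nil_append,
          PySem.List.foldl_append_singleton_eq_map, ih]
        simp [hpfx]
  rw [foldA_snd, List.nil_append, hA, List.nil_append]
  -- B's side
  have hB : ∀ (res : List (String × String)),
      ds.foldl (fun result d =>
        if !dHas d "parent" then
          ds.foldl (fun result c =>
            if dHas c "parent" && (dGetD c "parent" == dGetD d "name") then
              result ++ [(pfx ++ dGetD c "name", dGetD c "name")]
            else result)
            (result ++ [(dGetD d "name", dGetD d "name")])
        else result) res
      = res ++ (ds.filter (fun d => !dHas d "parent")).flatMap (fun d =>
          (dGetD d "name", dGetD d "name") ::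
            (ds.filter (fun c => dHas c "parent" && (dGetD c "parent" == dGetD d "name"))).map
              (fun c => (pfx ++ dGetD c "name", dGetD c "name"))) := by
    intro res
    rw [← foldl_append_block ds (fun d => !dHas d "parent")
      (fun d => (dGetD d "name", dGetD d "name") ::
          (ds.filter (fun c => dHas c "parent" && (dGetD c "parent" == dGetD d "name"))).map
            (fun c => (pfx ++ dGetD c "name", dGetD c "name"))) res]
    apply PySem.List.foldl_congr_mem
    intro result d _
    by_cases h : dHas d "parent"
    · simp [h]
    · simp only [h, Bool.not_false, if_pos]
      rw [PySem.List.foldl_append_if]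
      simp
  rw [hB, List.nil_append]

-- ===== VERDICT (by name: the statement is the Claim_ definition above) =====
theorem get_district_names_spec : Claim_equal_get_district_names := by
  intro city_config with_hierarchy_prefix _ _
  unfold Spec_get_district_names
  exact get_district_names_spec_aux city_config with_hierarchy_prefix
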